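-- pv_equiv track=rewrite | github.com/demethan/Poker-Game-Organizer | app.py | normalize_rsvp_token
-- ===== SOURCE A (Python) =====
-- from typing import Optional
--
-- def normalize_rsvp_token(value: Optional[str]) -> Optional[str]:
--     token = (value or "").strip()
--     if not token:
--         return None
--     if len(token) < 8 or len(token) > 64:
--         return None
--     for ch in token:
--         if not (ch.isalnum() or ch in {"-", "_"}):
--             return None
--     return token
-- ===== SOURCE B (Python) =====
-- import re
-- from typing import Optional
--
-- _TOKEN_RE = re.compile(r'[-\w]{8,64}')
--
-- def normalize_rsvp_token(value: Optional[str]) -> Optional[str]: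
--     token = (value or "").strip()
--     return token if _TOKEN_RE.fullmatch(token) else None
-- ===== Notes on version B (the rewrite author's own statement) =====
-- stated objective: idiomatic
-- what changed: Replaces A's emptiness guard, explicit length comparisons and per-character validation loop by a single compiled-regex fullmatch of [-\w]{8,64}: the counted repetition enforces both length bounds (and non-emptiness) and the character class enforces validity, so no loop or length test remains in B.
import Mathlib
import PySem

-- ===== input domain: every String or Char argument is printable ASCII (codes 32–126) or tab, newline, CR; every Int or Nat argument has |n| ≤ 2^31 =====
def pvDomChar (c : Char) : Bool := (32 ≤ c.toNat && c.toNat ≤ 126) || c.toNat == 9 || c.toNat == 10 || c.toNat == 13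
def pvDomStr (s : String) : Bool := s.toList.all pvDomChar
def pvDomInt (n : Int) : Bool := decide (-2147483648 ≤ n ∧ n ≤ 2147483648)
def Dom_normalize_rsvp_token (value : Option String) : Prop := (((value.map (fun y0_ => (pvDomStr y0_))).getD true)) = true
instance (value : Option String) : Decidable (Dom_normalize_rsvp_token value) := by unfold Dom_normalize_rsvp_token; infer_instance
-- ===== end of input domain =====

-- B replaces A's emptiness/length guards and per-character loop by one regex fullmatch of
-- [-\w]{8,64}, ported as a counted greedy class matcher (objective: idiomatic).

-- ===== PORT A =====
def normalize_rsvp_token (value : Option String) : Option String :=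
  -- token = (value or "").strip()
  let token := PySem.Str.strip (match value with | some s => if s = "" then "" else s | none => "")
  if token = "" then none
  else if PySem.Str.len token < 8 ∨ 64 < PySem.Str.len token then none
  else if token.toList.all (fun ch => PySem.Chars.isalnum ch || ch == '-' || ch == '_') then some token
  else none

-- ===== PORT B =====
-- the character class [-\w] of B's regex (\w = alphanumeric or underscore)
def pvWordClass (c : Char) : Bool := c == '-' || PySem.Chars.isalnum c || c == '_'

-- hand-written port of re.fullmatch(r'[-\w]{8,64}', ·): the engine greedily consumes
-- up to 64 class characters and succeeds iff the whole string was consumed with count ≥ 8;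
-- exact for this pattern (a single counted repetition of one class needs no backtracking
-- to decide fullmatch).
def pvFullmatchRep : List Char → Nat → Bool
  | [], n => decide (8 ≤ n)
  | c :: rest, n => if n < 64 then pvWordClass c && pvFullmatchRep rest (n + 1) else false

def normalize_rsvp_token_alt (value : Option String) : Option String :=
  let token := PySem.Str.strip (match value with | some s => if s = "" then "" else s | none => "")
  if pvFullmatchRep token.toList 0 then some token else none

-- ===== PRECONDITION & SPEC =====
def Spec_normalize_rsvp_token (value : Option String) (out : Option String) : Prop := out = normalize_rsvp_token_alt value
instance (value : Option String) (out : Option String) : Decidable (Spec_normalize_rsvp_token value out) := by unfold Spec_normalize_rsvp_token; infer_instance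

-- ===== CLAIM (what is proved, stated in full; the proofs are below) =====
def Claim_equal_normalize_rsvp_token : Prop := ∀ (value : Option String), Dom_normalize_rsvp_token value → Spec_normalize_rsvp_token value (normalize_rsvp_token value)

-- ===== LEMMAS AND PROOFS =====

-- characterisation of the regex matcher: generalized over the running count
lemma pvFullmatchRep_iff (l : List Char) (n : Nat) (hn : n ≤ 64) :
    pvFullmatchRep l n = true ↔
      (∀ c ∈ l, pvWordClass c = true) ∧ 8 ≤ n + l.length ∧ n + l.length ≤ 64 := by
  induction l generalizing n with
  | nil => simp [pvFullmatchRep]; omega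
  | cons c rest ih =>
      simp only [pvFullmatchRep, List.mem_cons, List.length_cons]
      by_cases h : n < 64
      · rw [if_pos h]
        simp only [Bool.and_eq_true, ih (n + 1) (by omega)]
        constructor
        · rintro ⟨hc, hall, h8, h64⟩
          exact ⟨by rintro d (rfl | hd); exact hc; exact hall d hd, by omega, by omega⟩
        · rintro ⟨hall, h8, h64⟩
          exact ⟨hall c (Or.inl rfl), fun d hd => hall d (Or.inr hd), by omega, by omega⟩
      · rw [if_neg h]
        simp only [Bool.false_eq_true, false_iff]
        rintro ⟨-, -, h64⟩
        omega

-- A's per-character predicate is B's regex class (boolean ‖ is commutative/associative)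
lemma pv_class_eq (c : Char) :
    (PySem.Chars.isalnum c || c == '-' || c == '_') = pvWordClass c := by
  unfold pvWordClass
  cases h1 : PySem.Chars.isalnum c <;> cases h2 : c == '-' <;> cases h3 : c == '_' <;> rfl

-- the two guard structures agree on any stripped token
lemma pv_main (t : String) :
    (if t = "" then none
     else if PySem.Str.len t < 8 ∨ 64 < PySem.Str.len t then none
     else if t.toList.all (fun ch => PySem.Chars.isalnum ch || ch == '-' || ch == '_') then some t
     else none)
    = (if pvFullmatchRep t.toList 0 then some t else none) := by
  have hlen : PySem.Str.len t = (t.toList.length : Int) := PySem.Str.len_eq t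
  have hiff := pvFullmatchRep_iff t.toList 0 (by omega)
  simp only [Nat.zero_add] at hiff
  by_cases hm : pvFullmatchRep t.toList 0 = true
  · obtain ⟨hall, h8, h64⟩ := hiff.mp hm
    have hne : t ≠ "" := by
      intro h; subst h; simp at h8
    rw [if_pos hm, if_neg hne, if_neg (by omega), if_pos]
    rw [List.all_eq_true]
    intro c hc
    rw [pv_class_eq]; exact hall c hc
  · rw [if_neg hm]
    by_cases h1 : t = ""
    · rw [if_pos h1]
    rw [if_neg h1]
    by_cases h2 : PySem.Str.len t < 8 ∨ 64 < PySem.Str.len t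
    · rw [if_pos h2]
    rw [if_neg h2]
    rw [if_neg]
    intro hall
    apply hm
    rw [hiff]
    refine ⟨?_, by omega, by omega⟩
    intro c hc
    rw [← pv_class_eq]
    exact (List.all_eq_true.mp hall) c hc

-- ===== VERDICT (by name: the statement is the Claim_ definition above) =====
theorem normalize_rsvp_token_spec : Claim_equal_normalize_rsvp_token := by
  intro value _
  unfold Spec_normalize_rsvp_token normalize_rsvp_token normalize_rsvp_token_alt
  exact pv_main _
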